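-- pv_equiv track=rewrite | github.com/pypi-data/pypi-mirror-403 | packages/mdformat_space_control/mdformat_space_control-0.3.0.tar.gz/mdformat_space_control-0.3.0/mdformat_space_control/plugin.py | _strip_trailing_whitespace
-- ===== SOURCE A (Python) =====
-- def _strip_trailing_whitespace(text: str) -> str:
--     """Strip trailing whitespace, preserving code blocks.
--
--     Fenced code blocks (``` or ~~~) preserve trailing whitespace
--     since it may be semantically meaningful in code.
--     """
--     lines = text.split("\n")
--     result = []
--     in_code_block = False
--
--     for line in lines:
--         # Track fenced code block state
--         stripped = line.lstrip()
--         if stripped.startswith("```") or stripped.startswith("~~~"):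
--             in_code_block = not in_code_block
--             result.append(line.rstrip())  # Strip fence line itself
--         elif in_code_block:
--             # Preserve trailing whitespace inside code blocks
--             result.append(line)
--         else:
--             # Strip trailing whitespace everywhere else
--             result.append(line.rstrip())
--
--     return "\n".join(result)
-- ===== SOURCE B (Python) =====
-- def _strip_trailing_whitespace(text: str) -> str:
--     """Strip trailing whitespace, preserving fenced code blocks.
--
--     Three passes: (1) mark fence lines, (2) prefix-count parity of fences
--     strictly before each line, (3) rstrip every line that is a fence or
--     lies outside a code block (even parity), keep the rest verbatim.
--     """
--     lines = text.split("\n")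
--     fence = [line.lstrip().startswith(("```", "~~~")) for line in lines]
--     inside = []
--     count = 0
--     for f in fence:
--         inside.append(count % 2 == 1)
--         count += f
--     out = [
--         raw if (ins and not f) else raw.rstrip()
--         for raw, f, ins in zip(lines, fence, inside)
--     ]
--     return "\n".join(out)
-- ===== Notes on version B (the rewrite author's own statement) =====
-- stated objective: alternative
-- what changed: Replaces A's single stateful loop (toggling an in_code_block flag while appending) with three separate passes: a fence mask, a prefix-count parity list, and a zip comprehension choosing raw vs rstripped lines.
import Mathlib
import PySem

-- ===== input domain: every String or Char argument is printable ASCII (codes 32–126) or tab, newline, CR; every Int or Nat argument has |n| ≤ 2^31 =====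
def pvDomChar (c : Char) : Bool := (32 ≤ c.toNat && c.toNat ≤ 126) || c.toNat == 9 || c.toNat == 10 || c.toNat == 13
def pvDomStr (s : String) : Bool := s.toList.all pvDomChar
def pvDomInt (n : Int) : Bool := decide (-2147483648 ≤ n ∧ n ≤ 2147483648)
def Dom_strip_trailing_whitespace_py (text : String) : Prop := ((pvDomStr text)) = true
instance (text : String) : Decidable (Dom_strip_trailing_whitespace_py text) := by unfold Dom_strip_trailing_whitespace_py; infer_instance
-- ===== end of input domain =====

-- B rewrites A's stateful toggle loop as three passes (fence mask, prefix parity, zip); same values, same cost.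

-- ===== PORT A =====
def strip_trailing_whitespace_py (text : String) : String :=
  let lines := (PySem.Str.split? text "\n").getD []
  let st := lines.foldl
    (fun (st : List String × Bool) line =>
      let stripped := PySem.Str.lstrip line
      if PySem.Str.startswith stripped "```" || PySem.Str.startswith stripped "~~~" then
        (st.1 ++ [PySem.Str.rstrip line], !st.2)
      else if st.2 then
        (st.1 ++ [line], st.2)
      else
        (st.1 ++ [PySem.Str.rstrip line], st.2))
    ([], false)
  PySem.Str.join "\n" st.1

-- ===== PORT B =====
def pvIsFence (line : String) : Bool :=
  let s := PySem.Str.lstrip line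
  PySem.Str.startswith s "```" || PySem.Str.startswith s "~~~"

def strip_trailing_whitespace_py_alt (text : String) : String :=
  let lines := (PySem.Str.split? text "\n").getD []
  let fence := lines.map pvIsFence
  let inside := (fence.foldl
    (fun (st : List Bool × Nat) f =>
      (st.1 ++ [st.2 % 2 == 1], st.2 + (if f then 1 else 0)))
    ([], 0)).1
  let out := (lines.zip (fence.zip inside)).map
    (fun p => if p.2.2 && !p.2.1 then p.1 else PySem.Str.rstrip p.1)
  PySem.Str.join "\n" out

-- ===== PRECONDITION & SPEC =====
def Spec_strip_trailing_whitespace_py (text : String) (out : String) : Prop := out = strip_trailing_whitespace_py_alt text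
instance (text : String) (out : String) : Decidable (Spec_strip_trailing_whitespace_py text out) := by unfold Spec_strip_trailing_whitespace_py; infer_instance

-- ===== CLAIM (what is proved, stated in full; the proofs are below) =====
def Claim_equal_strip_trailing_whitespace_py : Prop := ∀ (text : String), Dom_strip_trailing_whitespace_py text → Spec_strip_trailing_whitespace_py text (strip_trailing_whitespace_py text)

-- ===== LEMMAS AND PROOFS =====

-- Named forms of the two loop bodies (definitionally equal to the lambdas in the ports).
def pvStepA (st : List String × Bool) (line : String) : List String × Bool :=
  if pvIsFence line then
    (st.1 ++ [PySem.Str.rstrip line], !st.2)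
  else if st.2 then
    (st.1 ++ [line], st.2)
  else
    (st.1 ++ [PySem.Str.rstrip line], st.2)

def pvStepB (st : List Bool × Nat) (f : Bool) : List Bool × Nat :=
  (st.1 ++ [st.2 % 2 == 1], st.2 + (if f then 1 else 0))

-- Reference processing: the lines produced when c fence lines were seen so far.
def pvProc (c : Nat) : List String → List String
  | [] => []
  | l :: ls =>
    (if (c % 2 == 1) && !pvIsFence l then l else PySem.Str.rstrip l)
      :: pvProc (c + (if pvIsFence l then 1 else 0)) ls

lemma pvParity_flip (c : Nat) : (!(c % 2 == 1)) = ((c + 1) % 2 == 1) := by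
  rcases Nat.even_or_odd c with h | h <;>
    simp [Nat.even_iff.mp, Nat.odd_iff.mp, *]

-- A's fold, from any accumulator whose flag is the parity of c, produces pvProc.
lemma pvA_fold (ls : List String) (res : List String) (c : Nat) :
    (ls.foldl pvStepA (res, c % 2 == 1)).1 = res ++ pvProc c ls := by
  induction ls generalizing res c with
  | nil => simp [pvProc]
  | cons l ls ih =>
    rw [List.foldl_cons]
    by_cases hf : pvIsFence l
    · have hstep : pvStepA (res, c % 2 == 1) l
          = (res ++ [PySem.Str.rstrip l], (c + 1) % 2 == 1) := by
        simp only [pvStepA, hf, if_true, pvParity_flip]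
      rw [hstep, ih]
      simp [pvProc, hf]
    · have hstep : pvStepA (res, c % 2 == 1) l
          = (res ++ [if (c % 2 == 1) && !pvIsFence l then l else PySem.Str.rstrip l],
             (c + 0) % 2 == 1) := by
        by_cases hc : c % 2 == 1 <;>
          simp only [pvStepA, hf, hc, Bool.false_eq_true, if_false, if_true,
            Bool.true_and, Bool.false_and, Bool.not_false, Nat.add_zero]
      rw [hstep, ih]
      simp [pvProc, hf]

-- The parities B's inside-list holds, starting from count c.
def pvInsides (c : Nat) : List Bool → List Bool
  | [] => []
  | f :: fs => (c % 2 == 1) :: pvInsides (c + (if f then 1 else 0)) fs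

-- B's fold, from any accumulator, appends the parities.
lemma pvB_fold (fs : List Bool) (res : List Bool) (c : Nat) :
    (fs.foldl pvStepB (res, c)).1 = res ++ pvInsides c fs := by
  induction fs generalizing res c with
  | nil => simp [pvInsides]
  | cons f fs ih => simp [pvStepB, pvInsides, ih]

-- B's zip/map over the mask and the parities is pvProc.
lemma pvB_zip (ls : List String) (c : Nat) :
    ((ls.zip ((ls.map pvIsFence).zip (pvInsides c (ls.map pvIsFence)))).map
      (fun p => if p.2.2 && !p.2.1 then p.1 else PySem.Str.rstrip p.1))
      = pvProc c ls := by
  induction ls generalizing c with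
  | nil => simp [pvProc]
  | cons l ls ih =>
    simp only [List.map_cons, pvInsides, List.zip_cons_cons, pvProc, List.map]
    rw [ih]

-- The two pipelines agree on any list of lines.
lemma pvMain (ls : List String) :
    (ls.foldl pvStepA ([], false)).1
      = ((ls.zip ((ls.map pvIsFence).zip
            (((ls.map pvIsFence).foldl pvStepB ([], 0)).1))).map
          (fun p => if p.2.2 && !p.2.1 then p.1 else PySem.Str.rstrip p.1)) := by
  rw [pvB_fold, List.nil_append, pvB_zip]
  simpa using pvA_fold ls [] 0

-- ===== VERDICT (by name: the statement is the Claim_ definition above) =====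
theorem strip_trailing_whitespace_py_spec : Claim_equal_strip_trailing_whitespace_py := by
  intro text _
  show strip_trailing_whitespace_py text = strip_trailing_whitespace_py_alt text
  unfold strip_trailing_whitespace_py strip_trailing_whitespace_py_alt
  exact congrArg (PySem.Str.join "\n") (pvMain ((PySem.Str.split? text "\n").getD []))
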